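-- pv_equiv track=rewrite | github.com/aditya-kamatt/production-grade-retrieval-platform | app/processing/chunking.py | _find_good_boundary
-- ===== SOURCE A (Python) =====
-- def _find_good_boundary(text: str, start: int, candidate_end: int) -> int:
--     """
--     Prefer chunk endings at:
--     1. paragraph boundary
--     2. newline
--     3. sentence-ish boundary
--     4. hard cutoff
--     """
--     search_window_start = max(start, candidate_end - 200)
--     window = text[search_window_start:candidate_end]
--
--     paragraph_break = window.rfind("\n\n")
--     if paragraph_break != -1:
--         return search_window_start + paragraph_break + 2
--
--     line_break = window.rfind("\n")
--     if line_break != -1: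
--         return search_window_start + line_break + 1
--
--     sentence_breaks = [". ", "! ", "? "]
--     best_sentence_break = -1
--     for marker in sentence_breaks:
--         pos = window.rfind(marker)
--         if pos > best_sentence_break:
--             best_sentence_break = pos
--
--     if best_sentence_break != -1:
--         return search_window_start + best_sentence_break + 2
--
--     return candidate_end
-- ===== SOURCE B (Python) =====
-- def _find_good_boundary(text: str, start: int, candidate_end: int) -> int:
--     search_window_start = max(start, candidate_end - 200)
--     window = text[search_window_start:candidate_end]
--     n = len(window)
--     para = nl = sent = -1
--     for i, ch in enumerate(window):
--         nxt = window[i + 1] if i + 1 < n else ""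
--         if ch == "\n":
--             nl = i
--             if nxt == "\n":
--                 para = i
--         elif ch in ".!?" and nxt == " ":
--             sent = i
--     if para != -1:
--         return search_window_start + para + 2
--     if nl != -1:
--         return search_window_start + nl + 1
--     if sent != -1:
--         return search_window_start + sent + 2
--     return candidate_end
-- ===== Notes on version B (the rewrite author's own statement) =====
-- stated objective: alternative
-- what changed: Replaces four independent str.rfind scans of the window (one per pattern '\n\n', '\n', and a loop over '. ', '! ', '? ') by a single forward pass over the window that tracks the rightmost paragraph break, newline and sentence marker simultaneously, then applies the same precedence.
import Mathlib
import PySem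

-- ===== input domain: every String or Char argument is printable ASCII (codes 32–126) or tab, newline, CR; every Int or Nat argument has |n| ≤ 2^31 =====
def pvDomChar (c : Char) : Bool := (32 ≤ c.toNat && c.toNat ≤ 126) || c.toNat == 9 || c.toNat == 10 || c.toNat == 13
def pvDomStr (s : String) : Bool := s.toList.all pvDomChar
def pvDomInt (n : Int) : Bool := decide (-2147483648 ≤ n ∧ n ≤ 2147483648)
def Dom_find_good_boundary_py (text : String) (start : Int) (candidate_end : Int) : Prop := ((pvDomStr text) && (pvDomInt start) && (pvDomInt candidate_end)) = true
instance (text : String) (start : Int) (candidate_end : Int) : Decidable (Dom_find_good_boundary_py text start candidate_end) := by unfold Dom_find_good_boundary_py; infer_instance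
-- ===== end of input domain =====

-- B replaces A's four rfind scans of the window by one forward pass tracking the rightmost
-- paragraph break, newline and sentence marker; same precedence, same result (alternative, not faster).

-- ===== PORT A =====
def find_good_boundary_py (text : String) (start : Int) (candidate_end : Int) : Int :=
  let search_window_start := max start (candidate_end - 200)
  let window := PySem.Str.slice text (some search_window_start) (some candidate_end)
  let paragraph_break := PySem.Str.rfind window "\n\n"
  if paragraph_break ≠ -1 then search_window_start + paragraph_break + 2
  else
    let line_break := PySem.Str.rfind window "\n"
    if line_break ≠ -1 then search_window_start + line_break + 1
    else
      let best_sentence_break :=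
        List.foldl (fun best marker =>
          let pos := PySem.Str.rfind window marker
          if pos > best then pos else best) (-1) [". ", "! ", "? "]
      if best_sentence_break ≠ -1 then search_window_start + best_sentence_break + 2
      else candidate_end

-- ===== PORT B =====
-- the single forward pass of Source B: i is the current index, (para, nl, sent) the rightmost
-- indices seen so far (-1 = none); rest.head? is Source B's `nxt` lookahead
def fgbScan : List Char → Nat → Int → Int → Int → Int × Int × Int
  | [], _, para, nl, sent => (para, nl, sent)
  | c :: rest, i, para, nl, sent =>
    if c = '\n' then
      fgbScan rest (i + 1) (if rest.head? = some '\n' then (i : Int) else para) (i : Int) sent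
    else if (c = '.' ∨ c = '!' ∨ c = '?') ∧ rest.head? = some ' ' then
      fgbScan rest (i + 1) para nl (i : Int)
    else
      fgbScan rest (i + 1) para nl sent

def find_good_boundary_py_alt (text : String) (start : Int) (candidate_end : Int) : Int :=
  let search_window_start := max start (candidate_end - 200)
  let window := PySem.Str.slice text (some search_window_start) (some candidate_end)
  let r := fgbScan window.toList 0 (-1) (-1) (-1)
  if r.1 ≠ -1 then search_window_start + r.1 + 2
  else if r.2.1 ≠ -1 then search_window_start + r.2.1 + 1
  else if r.2.2 ≠ -1 then search_window_start + r.2.2 + 2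
  else candidate_end

-- ===== PRECONDITION & SPEC =====
def Spec_find_good_boundary_py (text : String) (start : Int) (candidate_end : Int) (out : Int) : Prop := out = find_good_boundary_py_alt text start candidate_end
instance (text : String) (start : Int) (candidate_end : Int) (out : Int) : Decidable (Spec_find_good_boundary_py text start candidate_end out) := by unfold Spec_find_good_boundary_py; infer_instance

-- ===== CLAIM (what is proved, stated in full; the proofs are below) =====
def Claim_equal_find_good_boundary_py : Prop := ∀ (text : String) (start : Int) (candidate_end : Int), Dom_find_good_boundary_py text start candidate_end → Spec_find_good_boundary_py text start candidate_end (find_good_boundary_py text start candidate_end)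

-- ===== LEMMAS AND PROOFS =====

-- rightmost j ≤ k with P j, else -1 (the shape of CPython's rfind downward scan)
def fgbDown (P : Nat → Bool) : Nat → Int
  | 0 => if P 0 then 0 else -1
  | k + 1 => if P (k + 1) then ((k + 1 : Nat) : Int) else fgbDown P k

lemma fgbDown_le (P : Nat → Bool) (k : Nat) : fgbDown P k ≤ (k : Int) := by
  induction k with
  | zero => unfold fgbDown; split <;> omega
  | succ k ih => simp only [fgbDown]; split <;> omega

lemma neg_one_le_fgbDown (P : Nat → Bool) (k : Nat) : (-1 : Int) ≤ fgbDown P k := by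
  induction k with
  | zero => unfold fgbDown; split <;> omega
  | succ k ih => simp only [fgbDown]; split <;> omega

lemma fgbDown_eq_of (P : Nat → Bool) (k i : Nat) (hik : i ≤ k) (hPi : P i = true)
    (hAbove : ∀ j, i < j → P j = false) : fgbDown P k = (i : Int) := by
  induction k with
  | zero => interval_cases i; simp [fgbDown, hPi]
  | succ k ih =>
    rcases Nat.lt_or_ge i (k + 1) with h | h
    · have : P (k + 1) = false := hAbove _ (by omega)
      simp [fgbDown, this]
      exact ih (by omega)
    · have : i = k + 1 := by omega
      subst this
      simp [fgbDown, hPi]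

lemma fgbDown_eq_neg_one (P : Nat → Bool) (k : Nat) (h : ∀ j, j ≤ k → P j = false) :
    fgbDown P k = -1 := by
  induction k with
  | zero => simp [fgbDown, h 0 (by omega)]
  | succ k ih =>
    simp [fgbDown, h (k + 1) (by omega)]
    exact ih fun j hj => h j (by omega)

lemma rfind_go_eq_fgbDown (s sub : List Char) (k : Nat) :
    PySem.Chars.rfind.go s sub k = fgbDown (fun j => sub.isPrefixOf (s.drop j)) k := by
  induction k with
  | zero => simp [PySem.Chars.rfind.go, fgbDown]
  | succ k ih => simp [PySem.Chars.rfind.go, fgbDown, ih]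

lemma isPrefixOf_one (a : Char) (t : List Char) :
    [a].isPrefixOf t = decide (t[0]? = some a) := by
  cases t with
  | nil => simp [List.isPrefixOf]
  | cons c t =>
    by_cases h : c = a
    · subst h; simp [List.isPrefixOf]
    · simp only [List.isPrefixOf]
      simp [h]
      exact fun h' => absurd h'.symm h

lemma isPrefixOf_two (a b : Char) (t : List Char) :
    [a, b].isPrefixOf t = decide (t[0]? = some a ∧ t[1]? = some b) := by
  match t with
  | [] => simp [List.isPrefixOf]
  | [c] => simp [List.isPrefixOf]
  | c :: d :: t =>
    by_cases h1 : c = a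
    · by_cases h2 : d = b
      · subst h1; subst h2; simp [List.isPrefixOf]
      · simp only [List.isPrefixOf]
        simp [h2]
        exact fun _ h' => h2 h'.symm
    · simp only [List.isPrefixOf]
      simp [h1]
      exact fun h' => absurd h'.symm h1

-- the three per-index predicates the scan tracks, over the whole window w
def fgbPp (w : List Char) (j : Nat) : Bool := decide (w[j]? = some '\n' ∧ w[j + 1]? = some '\n')
def fgbPn (w : List Char) (j : Nat) : Bool := decide (w[j]? = some '\n')
def fgbPs (w : List Char) (j : Nat) : Bool :=
  decide ((w[j]? = some '.' ∨ w[j]? = some '!' ∨ w[j]? = some '?') ∧ w[j + 1]? = some ' ')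

lemma fgbPp_lt (w : List Char) (j : Nat) (h : fgbPp w j = true) : j < w.length := by
  simp [fgbPp] at h; exact (List.getElem?_eq_some_iff.mp h.1).1
lemma fgbPn_lt (w : List Char) (j : Nat) (h : fgbPn w j = true) : j < w.length := by
  simp [fgbPn] at h; exact (List.getElem?_eq_some_iff.mp h).1
lemma fgbPs_lt (w : List Char) (j : Nat) (h : fgbPs w j = true) : j < w.length := by
  simp [fgbPs] at h
  rcases h.1 with h' | h' | h' <;> exact (List.getElem?_eq_some_iff.mp h').1

-- "the value the accumulator for P holds after the scan has passed indices < i"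
def fgbG (w : List Char) (P : Nat → Bool) (i : Nat) (acc : Int) : Int :=
  if ∃ j < w.length, i ≤ j ∧ P j = true then fgbDown P w.length else acc

lemma fgbG_step (w : List Char) (P : Nat → Bool) (i : Nat) (acc : Int)
    (hP : ∀ j, P j = true → j < w.length) :
    fgbG w P i acc = fgbG w P (i + 1) (if P i = true then (i : Int) else acc) := by
  by_cases hi : P i = true
  · have hlen : i < w.length := hP i hi
    simp only [fgbG, hi]
    rw [if_pos ⟨i, hlen, le_refl i, hi⟩]
    by_cases hex : ∃ j < w.length, i + 1 ≤ j ∧ P j = true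
    · rw [if_pos hex]
    · rw [if_neg hex]
      exact fgbDown_eq_of P w.length i (by omega) hi fun j hj => by
        by_contra hc
        simp only [Bool.not_eq_false] at hc
        exact hex ⟨j, hP j hc, by omega, hc⟩
  · rw [if_neg hi]
    unfold fgbG
    have hiff : (∃ j < w.length, i ≤ j ∧ P j = true) ↔ ∃ j < w.length, i + 1 ≤ j ∧ P j = true := by
      constructor
      · rintro ⟨j, h1, h2, h3⟩
        refine ⟨j, h1, ?_, h3⟩
        rcases Nat.eq_or_lt_of_le h2 with h | h
        · exact absurd (by rw [h]; exact h3) hi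
        · omega
      · rintro ⟨j, h1, h2, h3⟩; exact ⟨j, h1, by omega, h3⟩
    exact if_congr hiff rfl rfl

lemma fgbG_zero (w : List Char) (P : Nat → Bool) (hP : ∀ j, P j = true → j < w.length) :
    fgbG w P 0 (-1) = fgbDown P w.length := by
  unfold fgbG
  split
  · rfl
  · next hex =>
    rw [fgbDown_eq_neg_one]
    intro j _
    by_contra hc
    simp only [Bool.not_eq_false] at hc
    exact hex ⟨j, hP j hc, Nat.zero_le j, hc⟩

-- the scan computes exactly the three accumulators fgbG describes
lemma fgbScan_eq (w : List Char) : ∀ (cs : List Char) (i : Nat) (para nl sent : Int),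
    cs = w.drop i →
    fgbScan cs i para nl sent =
      (fgbG w (fgbPp w) i para, fgbG w (fgbPn w) i nl, fgbG w (fgbPs w) i sent) := by
  intro cs
  induction cs with
  | nil =>
    intro i para nl sent h
    have hlen : w.length ≤ i := by
      have := List.drop_eq_nil_iff.mp h.symm
      omega
    simp only [fgbScan, fgbG]
    rw [if_neg (by rintro ⟨j, h1, h2, _⟩; omega), if_neg (by rintro ⟨j, h1, h2, _⟩; omega),
        if_neg (by rintro ⟨j, h1, h2, _⟩; omega)]
  | cons c rest ih =>
    intro i para nl sent h
    have hci : w[i]? = some c := by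
      have : (w.drop i)[0]? = some c := by rw [← h]; rfl
      simpa using this
    have hrest : rest = w.drop (i + 1) := by
      have : (w.drop i).drop 1 = rest := by rw [← h]; rfl
      rw [← this, List.drop_drop]
    have hhead : rest.head? = w[i + 1]? := by
      rw [hrest, List.head?_drop]
    simp only [fgbScan]
    split
    · next hc =>
      subst hc
      rw [ih (i + 1) _ _ _ hrest]
      rw [fgbG_step w (fgbPp w) i para (fgbPp_lt w), fgbG_step w (fgbPn w) i nl (fgbPn_lt w),
          fgbG_step w (fgbPs w) i sent (fgbPs_lt w)]
      have hPn : fgbPn w i = true := by simp [fgbPn, hci]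
      have hPs : fgbPs w i = false := by simp [fgbPs, hci]
      have hPp : (if fgbPp w i = true then (i : Int) else para)
          = (if rest.head? = some '\n' then (i : Int) else para) := by
        simp [fgbPp, hci, hhead]
      rw [hPn, hPs, hPp]
      simp
    · next hc =>
      split
      · next hs =>
        rw [ih (i + 1) _ _ _ hrest]
        rw [fgbG_step w (fgbPp w) i para (fgbPp_lt w), fgbG_step w (fgbPn w) i nl (fgbPn_lt w),
            fgbG_step w (fgbPs w) i sent (fgbPs_lt w)]
        have hPn : fgbPn w i = false := by simp [fgbPn, hci, hc]
        have hPp : fgbPp w i = false := by simp [fgbPp, hci, hc]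
        have hPs : fgbPs w i = true := by
          simp only [fgbPs, hci, ← hhead, decide_eq_true_eq]
          rcases hs.1 with h' | h' | h' <;> subst h' <;> simp [hs.2]
        rw [hPs, hPn, hPp, if_pos rfl]
        simp
      · next hs =>
        rw [ih (i + 1) _ _ _ hrest]
        rw [fgbG_step w (fgbPp w) i para (fgbPp_lt w), fgbG_step w (fgbPn w) i nl (fgbPn_lt w),
            fgbG_step w (fgbPs w) i sent (fgbPs_lt w)]
        have hPn : fgbPn w i = false := by simp [fgbPn, hci, hc]
        have hPp : fgbPp w i = false := by simp [fgbPp, hci, hc]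
        have hPs : fgbPs w i = false := by
          simp only [fgbPs, hci, ← hhead, decide_eq_false_iff_not]
          intro hcontra
          exact hs ⟨by rcases hcontra.1 with h' | h' | h' <;> simp_all, hcontra.2⟩
        rw [hPn, hPp, hPs]
        simp

-- max of two downward scans = downward scan of the disjunction
lemma fgbDown_or (P Q : Nat → Bool) (k : Nat) :
    fgbDown (fun j => P j || Q j) k = max (fgbDown P k) (fgbDown Q k) := by
  induction k with
  | zero =>
    simp only [fgbDown]
    by_cases hp : P 0 = true <;> by_cases hq : Q 0 = true <;> simp [hp, hq]
  | succ k ih =>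
    simp only [fgbDown, ih]
    have hP := fgbDown_le P k
    have hQ := fgbDown_le Q k
    by_cases hp : P (k + 1) = true <;> by_cases hq : Q (k + 1) = true <;>
      simp [hp, hq] <;> omega

lemma if_gt_eq_max (best pos : Int) : (if pos > best then pos else best) = max best pos := by
  rcases max_cases best pos with ⟨h1, h2⟩ | ⟨h1, h2⟩ <;> rw [h1] <;> split <;> omega

-- A's rfind on the window, rewritten as the downward scan of the matching predicate
lemma rfind_nn (w : List Char) :
    PySem.Chars.rfind w ['\n', '\n'] = fgbDown (fgbPp w) w.length := by
  show PySem.Chars.rfind.go w ['\n', '\n'] w.length = _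
  rw [rfind_go_eq_fgbDown]
  congr 1
  funext j
  rw [isPrefixOf_two]
  simp [fgbPp, List.getElem?_drop]

lemma rfind_n (w : List Char) :
    PySem.Chars.rfind w ['\n'] = fgbDown (fgbPn w) w.length := by
  show PySem.Chars.rfind.go w ['\n'] w.length = _
  rw [rfind_go_eq_fgbDown]
  congr 1
  funext j
  rw [isPrefixOf_one]
  simp [fgbPn, List.getElem?_drop]

lemma rfind_marker (w : List Char) (a : Char) :
    PySem.Chars.rfind w [a, ' '] = fgbDown (fun j => decide (w[j]? = some a ∧ w[j + 1]? = some ' ')) w.length := by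
  show PySem.Chars.rfind.go w [a, ' '] w.length = _
  rw [rfind_go_eq_fgbDown]
  congr 1
  funext j
  rw [isPrefixOf_two]
  simp [List.getElem?_drop]

-- the two chunk-boundary expressions agree for any window
lemma fgb_or_split (w : List Char) :
    fgbPs w = fun j =>
      (decide (w[j]? = some '.' ∧ w[j + 1]? = some ' ') ||
       (decide (w[j]? = some '!' ∧ w[j + 1]? = some ' ') ||
        decide (w[j]? = some '?' ∧ w[j + 1]? = some ' '))) := by
  funext j
  rw [fgbPs, Bool.eq_iff_iff]
  simp only [decide_eq_true_eq, Bool.or_eq_true]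
  tauto

lemma fgb_core (sws candidate_end : Int) (window : String) :
    (let paragraph_break := PySem.Str.rfind window "\n\n"
     if paragraph_break ≠ -1 then sws + paragraph_break + 2
     else
       let line_break := PySem.Str.rfind window "\n"
       if line_break ≠ -1 then sws + line_break + 1
       else
         let best_sentence_break :=
           List.foldl (fun best marker =>
             let pos := PySem.Str.rfind window marker
             if pos > best then pos else best) (-1) [". ", "! ", "? "]
         if best_sentence_break ≠ -1 then sws + best_sentence_break + 2
         else candidate_end) =
    (let r := fgbScan window.toList 0 (-1) (-1) (-1)
     if r.1 ≠ -1 then sws + r.1 + 2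
     else if r.2.1 ≠ -1 then sws + r.2.1 + 1
     else if r.2.2 ≠ -1 then sws + r.2.2 + 2
     else candidate_end) := by
  have hscan : fgbScan window.toList 0 (-1) (-1) (-1) =
      (fgbDown (fgbPp window.toList) window.toList.length,
       fgbDown (fgbPn window.toList) window.toList.length,
       fgbDown (fgbPs window.toList) window.toList.length) := by
    rw [fgbScan_eq window.toList window.toList 0 (-1) (-1) (-1) (by simp),
        fgbG_zero _ _ (fgbPp_lt window.toList), fgbG_zero _ _ (fgbPn_lt window.toList),
        fgbG_zero _ _ (fgbPs_lt window.toList)]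
  have hpara : PySem.Str.rfind window "\n\n" = fgbDown (fgbPp window.toList) window.toList.length := by
    rw [PySem.Str.rfind_eq, show ("\n\n").toList = ['\n', '\n'] from rfl, rfind_nn]
  have hline : PySem.Str.rfind window "\n" = fgbDown (fgbPn window.toList) window.toList.length := by
    rw [PySem.Str.rfind_eq, show ("\n").toList = ['\n'] from rfl, rfind_n]
  have hsent : List.foldl (fun best marker =>
        let pos := PySem.Str.rfind window marker
        if pos > best then pos else best) (-1) [". ", "! ", "? "] =
      fgbDown (fgbPs window.toList) window.toList.length := by
    simp only [List.foldl]
    rw [PySem.Str.rfind_eq, PySem.Str.rfind_eq, PySem.Str.rfind_eq,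
        show (". ").toList = ['.', ' '] from rfl, show ("! ").toList = ['!', ' '] from rfl,
        show ("? ").toList = ['?', ' '] from rfl,
        rfind_marker window.toList '.', rfind_marker window.toList '!', rfind_marker window.toList '?',
        if_gt_eq_max, if_gt_eq_max, if_gt_eq_max,
        max_eq_right (neg_one_le_fgbDown _ _), fgb_or_split window.toList,
        fgbDown_or, fgbDown_or, max_assoc]
  simp only [hscan, hpara, hline, hsent]

-- ===== VERDICT (by name: the statement is the Claim_ definition above) =====
theorem find_good_boundary_py_spec : Claim_equal_find_good_boundary_py := by
  intro text start candidate_end _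
  show find_good_boundary_py text start candidate_end = find_good_boundary_py_alt text start candidate_end
  unfold find_good_boundary_py find_good_boundary_py_alt
  exact fgb_core (max start (candidate_end - 200)) candidate_end
    (PySem.Str.slice text (some (max start (candidate_end - 200))) (some candidate_end))
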